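-- pv_equiv track=rewrite | github.com/Adedayooyetunji/PASSWORK-CRACKING | PASSWORD CRACKING.py | charset_size
-- ===== SOURCE A (Python) =====
-- def charset_size(pw: str) -> int:
--     lowers = any(c.islower() for c in pw)
--     uppers = any(c.isupper() for c in pw)
--     digits = any(c.isdigit() for c in pw)
--     symbols = any(not c.isalnum() for c in pw)
--     size = 0
--     size += 26 if lowers else 0
--     size += 26 if uppers else 0
--     size += 10 if digits else 0
--     # conservative common set ~33
--     size += 33 if symbols else 0
--     return max(size, 26)  # assume at least letters
-- ===== SOURCE B (Python) =====
-- def charset_size(pw: str) -> int: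
--     def category(c):
--         if c.islower():
--             return ('lower', 26)
--         if c.isupper():
--             return ('upper', 26)
--         if c.isdigit():
--             return ('digit', 10)
--         if not c.isalnum():
--             return ('symbol', 33)
--         return None
--
--     cats = {category(c) for c in pw}
--     cats.discard(None)
--     return max(sum(size for _name, size in cats), 26)
-- ===== Notes on version B (the rewrite author's own statement) =====
-- stated objective: alternative
-- what changed: Instead of four presence flags summed with per-class any() scans, B classifies each character once into a (name, size) category tuple, collects the set of distinct categories, and sums the sizes of the categories present.
import Mathlib
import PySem

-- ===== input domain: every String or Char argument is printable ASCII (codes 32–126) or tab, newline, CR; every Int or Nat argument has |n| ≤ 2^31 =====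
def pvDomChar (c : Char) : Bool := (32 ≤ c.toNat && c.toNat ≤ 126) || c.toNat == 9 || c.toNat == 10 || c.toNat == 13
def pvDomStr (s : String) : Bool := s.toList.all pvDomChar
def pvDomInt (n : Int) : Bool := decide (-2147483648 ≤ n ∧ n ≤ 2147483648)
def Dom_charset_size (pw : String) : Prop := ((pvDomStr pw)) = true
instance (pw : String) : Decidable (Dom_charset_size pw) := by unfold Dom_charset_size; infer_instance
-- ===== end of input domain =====

-- B replaces A's four per-class any() scans and flag sum by: classify each char into a (name, size)
-- category tuple, take the SET of distinct categories, sum their sizes (measured modestly faster).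

-- ===== PORT A =====
def charset_size (pw : String) : Int :=
  let lowers := pw.toList.any (fun c => PySem.Chars.islower c)
  let uppers := pw.toList.any (fun c => PySem.Chars.isupper c)
  let digits := pw.toList.any (fun c => PySem.Chars.isdigit c)
  let symbols := pw.toList.any (fun c => !(PySem.Chars.isalnum c))
  let size : Int := 0
  let size := size + (if lowers then 26 else 0)
  let size := size + (if uppers then 26 else 0)
  let size := size + (if digits then 10 else 0)
  let size := size + (if symbols then 33 else 0)
  max size 26

-- ===== PORT B =====
-- Source B's category(c): classify one character into its (name, size) category, or None
def csCategory (c : Char) : Option (String × Int) :=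
  if PySem.Chars.islower c then some ("lower", 26)
  else if PySem.Chars.isupper c then some ("upper", 26)
  else if PySem.Chars.isdigit c then some ("digit", 10)
  else if !(PySem.Chars.isalnum c) then some ("symbol", 33)
  else none

def charset_size_alt (pw : String) : Int :=
  let cats := PySem.Set.discard (PySem.Set.ofList (pw.toList.map csCategory)) none
  -- sum(size for _name, size in cats); the 'none' arm is unreachable (None was discarded);
  -- sum over the set is order-independent, so insertion order is exact here
  let total : Int := (cats.map (fun o => match o with | some p => p.2 | none => 0)).sum
  max total 26

-- ===== PRECONDITION & SPEC =====
def Spec_charset_size (pw : String) (out : Int) : Prop := out = charset_size_alt pw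
instance (pw : String) (out : Int) : Decidable (Spec_charset_size pw out) := by unfold Spec_charset_size; infer_instance

-- ===== CLAIM (what is proved, stated in full; the proofs are below) =====
def Claim_equal_charset_size : Prop := ∀ (pw : String), Dom_charset_size pw → Spec_charset_size pw (charset_size pw)

-- ===== LEMMAS AND PROOFS =====

theorem cs_lower_not_upper (c : Char) (h : PySem.Chars.islower c = true) :
    PySem.Chars.isupper c = false := by
  simp [PySem.Chars.islower] at h
  simp [PySem.Chars.isupper]
  intro _
  exact lt_of_lt_of_le (by decide) h.1

theorem cs_lower_not_digit (c : Char) (h : PySem.Chars.islower c = true) :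
    PySem.Chars.isdigit c = false := by
  simp [PySem.Chars.islower] at h
  simp [PySem.Chars.isdigit]
  intro _
  exact lt_of_lt_of_le (by decide) h.1

theorem cs_upper_not_digit (c : Char) (h : PySem.Chars.isupper c = true) :
    PySem.Chars.isdigit c = false := by
  simp [PySem.Chars.isupper] at h
  simp [PySem.Chars.isdigit]
  intro _
  exact lt_of_lt_of_le (by decide) h.1

theorem csCategory_eq_lower (c : Char) :
    csCategory c = some ("lower", 26) ↔ PySem.Chars.islower c = true := by
  unfold csCategory; split_ifs <;> simp_all

theorem csCategory_eq_upper (c : Char) :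
    csCategory c = some ("upper", 26) ↔ PySem.Chars.isupper c = true := by
  unfold csCategory
  split_ifs with h1 <;> simp_all [cs_lower_not_upper c]

theorem csCategory_eq_digit (c : Char) :
    csCategory c = some ("digit", 10) ↔ PySem.Chars.isdigit c = true := by
  unfold csCategory
  split_ifs with h1 h2 <;>
    simp_all [cs_lower_not_digit c, cs_upper_not_digit c]

theorem cs_lower_alnum (c : Char) (h : PySem.Chars.islower c = true) :
    PySem.Chars.isalnum c = true := by
  simp [PySem.Chars.isalnum, PySem.Chars.isalpha, PySem.Chars.islower] at h ⊢; tauto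

theorem cs_upper_alnum (c : Char) (h : PySem.Chars.isupper c = true) :
    PySem.Chars.isalnum c = true := by
  simp [PySem.Chars.isalnum, PySem.Chars.isalpha, PySem.Chars.isupper] at h ⊢; tauto

theorem cs_digit_alnum (c : Char) (h : PySem.Chars.isdigit c = true) :
    PySem.Chars.isalnum c = true := by
  simp [PySem.Chars.isalnum, PySem.Chars.isalpha, PySem.Chars.isdigit] at h ⊢; tauto

theorem csCategory_eq_symbol (c : Char) :
    csCategory c = some ("symbol", 33) ↔ (!(PySem.Chars.isalnum c)) = true := by
  unfold csCategory
  split_ifs with h1 h2 h3 h4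
  · simp [cs_lower_alnum c h1]
  · simp [cs_upper_alnum c h2]
  · simp [cs_digit_alnum c h3]
  · simp [h4]
  · simp at h4
    simp [h4]

theorem csCategory_range (c : Char) :
    csCategory c = none ∨ csCategory c = some ("lower", 26) ∨ csCategory c = some ("upper", 26)
      ∨ csCategory c = some ("digit", 10) ∨ csCategory c = some ("symbol", 33) := by
  unfold csCategory; split_ifs <;> simp

-- the set built by B, over a character list
def csSet (l : List Char) : List (Option (String × Int)) :=
  PySem.Set.discard (PySem.Set.ofList (l.map csCategory)) none

theorem mem_csSet (l : List Char) (o : Option (String × Int)) :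
    o ∈ csSet l ↔ (∃ c ∈ l, csCategory c = o) ∧ o ≠ none := by
  simp [csSet, PySem.Set.mem_discard, PySem.Set.mem_ofList]

theorem sum_csSet (l : List Char) :
    ((csSet l).map (fun o => match o with | some p => p.2 | none => (0 : Int))).sum
      = (if l.any (fun c => PySem.Chars.islower c) then 26 else 0)
        + (if l.any (fun c => PySem.Chars.isupper c) then 26 else 0)
        + (if l.any (fun c => PySem.Chars.isdigit c) then 10 else 0)
        + (if l.any (fun c => !(PySem.Chars.isalnum c)) then 33 else 0) := by
  have hnd : (csSet l).Nodup :=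
    PySem.Set.nodup_discard _ _ (PySem.Set.nodup_ofList _)
  have hperm : (csSet l).Perm
      (([some ("lower", 26), some ("upper", 26), some ("digit", 10),
         some ("symbol", 33)] : List (Option (String × Int))).filter
        (fun x => decide (x ∈ csSet l))) := by
    rw [List.perm_ext_iff_of_nodup hnd (List.Nodup.filter _ (by decide))]
    intro o
    simp only [List.mem_filter, decide_eq_true_eq]
    constructor
    · intro ho
      refine ⟨?_, ho⟩
      rcases (mem_csSet l o).1 ho with ⟨⟨c, _, hc⟩, hne⟩
      rcases csCategory_range c with h | h | h | h | h <;> rw [hc] at h <;> simp_all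
    · exact fun h => h.2
  rw [(hperm.map _).sum_eq]
  have e1 : (some ("lower", 26) ∈ csSet l) ↔ l.any (fun c => PySem.Chars.islower c) = true := by
    simp [mem_csSet, csCategory_eq_lower, List.any_eq_true]
  have e2 : (some ("upper", 26) ∈ csSet l) ↔ l.any (fun c => PySem.Chars.isupper c) = true := by
    simp [mem_csSet, csCategory_eq_upper, List.any_eq_true]
  have e3 : (some ("digit", 10) ∈ csSet l) ↔ l.any (fun c => PySem.Chars.isdigit c) = true := by
    simp [mem_csSet, csCategory_eq_digit, List.any_eq_true]
  have e4 : (some ("symbol", 33) ∈ csSet l) ↔ l.any (fun c => !(PySem.Chars.isalnum c)) = true := by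
    simp [mem_csSet, csCategory_eq_symbol, List.any_eq_true]
  by_cases h1 : l.any (fun c => PySem.Chars.islower c) = true <;>
    by_cases h2 : l.any (fun c => PySem.Chars.isupper c) = true <;>
      by_cases h3 : l.any (fun c => PySem.Chars.isdigit c) = true <;>
        by_cases h4 : l.any (fun c => !(PySem.Chars.isalnum c)) = true <;>
          simp [List.filter, e1, e2, e3, e4, h1, h2, h3, h4]

-- ===== VERDICT (by name: the statement is the Claim_ definition above) =====
theorem charset_size_spec : Claim_equal_charset_size := by
  intro pw _
  unfold Spec_charset_size
  have hA : charset_size pw =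
      max ((0 : Int) + (if pw.toList.any (fun c => PySem.Chars.islower c) then 26 else 0)
        + (if pw.toList.any (fun c => PySem.Chars.isupper c) then 26 else 0)
        + (if pw.toList.any (fun c => PySem.Chars.isdigit c) then 10 else 0)
        + (if pw.toList.any (fun c => !(PySem.Chars.isalnum c)) then 33 else 0)) 26 := rfl
  have hB : charset_size_alt pw =
      max ((csSet pw.toList).map
        (fun o => match o with | some p => p.2 | none => (0 : Int))).sum 26 := rfl
  rw [hA, hB, sum_csSet, zero_add]
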